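-- pv_equiv track=rewrite | github.com/samirsaliba/dsa-coding-exercises | sorting and searching/find_first_and_last_pos_of_element_in_arr.py | search_occurr
-- ===== SOURCE A (Python) =====
-- def search_occurr(nums, target, search_start_pos):
--     left = 0
--     right = len(nums)-1
--
--     while left<=right:
--         mid = left + (right-left)//2
--
--         if nums[mid] > target:
--             # num must be left of mid
--             right = mid-1
--
--         elif nums[mid] < target:
--             # num must be right of mid
--             left = mid+1
--
--         else:
--             # found num, but we must keep looking for either first/last
--             if search_start_pos:
--                 if left == mid  or nums[mid-1] < target:
--                     # found lower bound
--                     return mid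
--
--                 # else keep searching left for first occurrence
--                 right = mid-1
--
--             else:
--                 # looking for end position
--                 if right == mid or nums[mid+1] > target:
--                     # found end
--                     return mid
--
--                 # else we keep searching right for the last occurrence
--                 left = mid+1
--
--     return -1
-- ===== SOURCE B (Python) =====
-- def search_occurr(nums, target, search_start_pos):
--     if search_start_pos:
--         for i, x in enumerate(nums):
--             if x == target:
--                 return i
--         return -1
--     res = -1
--     for i, x in enumerate(nums):
--         if x == target:
--             res = i
--     return res
-- ===== Notes on version B (the rewrite author's own statement) =====
-- stated objective: simpler
-- what changed: Replaces A's neighbor-peeking binary search with a plain linear scan: a forward scan that returns the first matching index, or a full scan that records the last matching index, with -1 as the natural default.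
-- outside the precondition, e.g. on search_occurr([3, 1, 2], 1, True): A returns -1, B returns 1; on search_occurr([2, 1, 1], 1, False): A returns 2, B returns 2
import Mathlib
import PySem

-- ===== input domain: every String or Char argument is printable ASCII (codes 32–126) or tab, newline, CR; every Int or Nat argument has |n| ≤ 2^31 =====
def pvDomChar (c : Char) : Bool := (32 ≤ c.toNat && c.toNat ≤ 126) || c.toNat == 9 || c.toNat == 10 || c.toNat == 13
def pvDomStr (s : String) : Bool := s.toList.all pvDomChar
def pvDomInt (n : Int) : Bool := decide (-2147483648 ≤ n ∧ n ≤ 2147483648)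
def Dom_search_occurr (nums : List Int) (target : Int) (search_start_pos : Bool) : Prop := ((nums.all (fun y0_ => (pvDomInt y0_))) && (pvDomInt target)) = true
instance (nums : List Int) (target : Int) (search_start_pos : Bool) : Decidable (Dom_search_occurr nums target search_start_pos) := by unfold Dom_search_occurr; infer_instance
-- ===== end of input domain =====

-- B replaces A's binary search by a plain linear scan (forward scan returning the first
-- matching index / full scan recording the last matching index); objective: simpler.

-- indexing helper for port A: nums[i] (always in range along A's loop)
def pvGet (nums : List Int) (i : Int) : Int := PySem.List.pyGetD nums i 0

-- ===== PORT A =====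
-- the while-loop of A, state (left, right); early returns become return values
def search_occurr_loop (nums : List Int) (target : Int) (search_start_pos : Bool)
    (fuel : Nat) (left right : Int) : Int :=
  match fuel with
  | 0 => -1
  | fuel + 1 =>
  if left ≤ right then
    -- mid = left + (right-left)//2, inlined at each use
    if pvGet nums (left + PySem.Int.floordiv (right - left) 2) > target then
      search_occurr_loop nums target search_start_pos fuel left
        (left + PySem.Int.floordiv (right - left) 2 - 1)
    else if pvGet nums (left + PySem.Int.floordiv (right - left) 2) < target then
      search_occurr_loop nums target search_start_pos fuel
        (left + PySem.Int.floordiv (right - left) 2 + 1) right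
    else if search_start_pos then
      if left = left + PySem.Int.floordiv (right - left) 2 ∨
          pvGet nums (left + PySem.Int.floordiv (right - left) 2 - 1) < target then
        left + PySem.Int.floordiv (right - left) 2
      else
        search_occurr_loop nums target search_start_pos fuel left
          (left + PySem.Int.floordiv (right - left) 2 - 1)
    else
      if right = left + PySem.Int.floordiv (right - left) 2 ∨
          pvGet nums (left + PySem.Int.floordiv (right - left) 2 + 1) > target then
        left + PySem.Int.floordiv (right - left) 2
      else
        search_occurr_loop nums target search_start_pos fuel
          (left + PySem.Int.floordiv (right - left) 2 + 1) right
  else -1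

def search_occurr (nums : List Int) (target : Int) (search_start_pos : Bool) : Int :=
  -- fuel nums.length bounds the loop: the interval [left,right] starts with
  -- nums.length cells and loses at least one cell per iteration
  search_occurr_loop nums target search_start_pos nums.length 0 ((nums.length : Int) - 1)

-- ===== PORT B =====
-- B's first for-loop: 'for i, x in enumerate(nums): if x == target: return i' then -1
def search_occurr_alt_first (l : List Int) (target : Int) (i : Int) : Int :=
  match l with
  | [] => -1
  | x :: xs => if x = target then i else search_occurr_alt_first xs target (i + 1)

-- B's second for-loop: 'for i, x in enumerate(nums): if x == target: res = i' then res
def search_occurr_alt_last (l : List Int) (target : Int) (i res : Int) : Int :=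
  match l with
  | [] => res
  | x :: xs => search_occurr_alt_last xs target (i + 1) (if x = target then i else res)

def search_occurr_alt (nums : List Int) (target : Int) (search_start_pos : Bool) : Int :=
  if search_start_pos then search_occurr_alt_first nums target 0
  else search_occurr_alt_last nums target 0 (-1)

-- ===== PRECONDITION & SPEC =====
-- Pre_ excludes only unsorted lists that contain the target: there A's value is an
-- accident of its probe order, outside binary search's sorted-input contract (when
-- the target is absent both programs return -1 even on unsorted lists, so those stay in).
def Pre_search_occurr (nums : List Int) (target : Int) (search_start_pos : Bool) : Prop :=
  List.Pairwise (· ≤ ·) nums ∨ target ∉ nums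
instance (nums : List Int) (target : Int) (search_start_pos : Bool) : Decidable (Pre_search_occurr nums target search_start_pos) := by unfold Pre_search_occurr; infer_instance

def pvWitness_search_occurr : List Int × Int × Bool := ([1, 2, 2, 3], 2, true)

def Spec_search_occurr (nums : List Int) (target : Int) (search_start_pos : Bool) (out : Int) : Prop := out = search_occurr_alt nums target search_start_pos
instance (nums : List Int) (target : Int) (search_start_pos : Bool) (out : Int) : Decidable (Spec_search_occurr nums target search_start_pos out) := by unfold Spec_search_occurr; infer_instance

-- ===== CLAIM (what is proved, stated in full; the proofs are below) =====
def Claim_equal_search_occurr : Prop := ∀ (nums : List Int) (target : Int) (search_start_pos : Bool), Dom_search_occurr nums target search_start_pos → Pre_search_occurr nums target search_start_pos → Spec_search_occurr nums target search_start_pos (search_occurr nums target search_start_pos)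

-- ===== LEMMAS AND PROOFS =====

-- bounds of A's midpoint left + (right-left)//2
theorem pvMidA_bounds {left right : Int} (h : left ≤ right) :
    left ≤ left + PySem.Int.floordiv (right - left) 2 ∧
      left + PySem.Int.floordiv (right - left) 2 ≤ right := by
  rw [PySem.Int.floordiv_eq_ediv_of_pos (by omega : (0:Int) < 2)]; omega

-- index (as Option Nat) of the first occurrence of t in l
def pvFirstAux (l : List Int) (t : Int) : Option Nat :=
  match l with
  | [] => none
  | x :: xs => if x = t then some 0 else (pvFirstAux xs t).map (· + 1)

-- index (as Option Nat) of the last occurrence of t in l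
def pvLastAux (l : List Int) (t : Int) : Option Nat :=
  match l with
  | [] => none
  | x :: xs =>
    match pvLastAux xs t with
    | some k => some (k + 1)
    | none => if x = t then some 0 else none

def pvFirst (nums : List Int) (t : Int) : Int :=
  match pvFirstAux nums t with
  | some k => (k : Int)
  | none => -1

def pvLast (nums : List Int) (t : Int) : Int :=
  match pvLastAux nums t with
  | some k => (k : Int)
  | none => -1

theorem pvFirstAux_none {l : List Int} {t : Int} (h : pvFirstAux l t = none) : t ∉ l := by
  induction l with
  | nil => simp
  | cons x xs ih =>
    by_cases hx : x = t
    · simp [pvFirstAux, hx] at h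
    · simp only [pvFirstAux, if_neg hx, Option.map_eq_none_iff] at h
      simp [ih h, Ne.symm hx]

theorem pvFirstAux_some {l : List Int} {t : Int} {k : Nat} (h : pvFirstAux l t = some k) :
    k < l.length ∧ l[k]? = some t ∧ ∀ j < k, l[j]? ≠ some t := by
  induction l generalizing k with
  | nil => simp [pvFirstAux] at h
  | cons x xs ih =>
    by_cases hx : x = t
    · simp only [pvFirstAux, if_pos hx] at h
      obtain rfl : k = 0 := (Option.some_inj.mp h).symm
      simp [hx]
    · simp only [pvFirstAux, if_neg hx, Option.map_eq_some_iff] at h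
      obtain ⟨k', hk', rfl⟩ := h
      obtain ⟨h1, h2, h3⟩ := ih hk'
      refine ⟨by simpa using h1, by simpa using h2, ?_⟩
      intro j hj
      cases j with
      | zero => simp [hx]
      | succ j' => simpa using h3 j' (by omega)

theorem pvLastAux_none {l : List Int} {t : Int} (h : pvLastAux l t = none) : t ∉ l := by
  induction l with
  | nil => simp
  | cons x xs ih =>
    simp only [pvLastAux] at h
    cases hxs : pvLastAux xs t with
    | some k => rw [hxs] at h; cases h
    | none =>
      rw [hxs] at h
      by_cases hx : x = t
      · rw [if_pos hx] at h; cases h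
      · simp [ih hxs, Ne.symm hx]

theorem pvLastAux_some {l : List Int} {t : Int} {k : Nat} (h : pvLastAux l t = some k) :
    k < l.length ∧ l[k]? = some t ∧ ∀ j, k < j → j < l.length → l[j]? ≠ some t := by
  induction l generalizing k with
  | nil => simp [pvLastAux] at h
  | cons x xs ih =>
    simp only [pvLastAux] at h
    cases hxs : pvLastAux xs t with
    | some k' =>
      rw [hxs] at h
      obtain rfl : k = k' + 1 := by cases h; rfl
      obtain ⟨h1, h2, h3⟩ := ih hxs
      refine ⟨by simpa using h1, by simpa using h2, ?_⟩
      intro j hj hjl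
      cases j with
      | zero => omega
      | succ j' =>
        simp only [List.getElem?_cons_succ]
        exact h3 j' (by omega) (by simpa using hjl)
    | none =>
      rw [hxs] at h
      by_cases hx : x = t
      · rw [if_pos hx] at h
        obtain rfl : k = 0 := by cases h; rfl
        refine ⟨by simp, by simp [hx], ?_⟩
        intro j hj hjl
        cases j with
        | zero => omega
        | succ j' =>
          simp only [List.getElem?_cons_succ]
          intro hc
          exact pvLastAux_none hxs (by
            have : j' < xs.length := by simpa using hjl
            rw [List.getElem?_eq_getElem this] at hc
            cases hc; exact List.getElem_mem this)
      · rw [if_neg hx] at h; cases h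

-- bridge from pvGet to getElem? on in-range indices
theorem pvGet_eq {nums : List Int} {i : Int} (h0 : 0 ≤ i) (h1 : i < (nums.length : Int)) :
    nums[i.toNat]? = some (pvGet nums i) := by
  have hl : i.toNat < nums.length := by omega
  rw [List.getElem?_eq_getElem hl]
  rw [pvGet, PySem.List.pyGetD_eq_getElem nums 0 h0 h1]

theorem pvGet_mem {nums : List Int} {i : Int} (h0 : 0 ≤ i) (h1 : i < (nums.length : Int)) :
    pvGet nums i ∈ nums := by
  rw [pvGet, PySem.List.pyGetD_eq_getElem nums 0 h0 h1]
  exact List.getElem_mem (by omega)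

-- monotone access on a sorted list
theorem pv_mono {nums : List Int} (hs : List.Pairwise (· ≤ ·) nums) {i j : Int}
    (h0 : 0 ≤ i) (hij : i ≤ j) (hj : j < (nums.length : Int)) :
    pvGet nums i ≤ pvGet nums j := by
  rcases eq_or_lt_of_le hij with rfl | hlt
  · exact le_refl _
  · rw [pvGet, PySem.List.pyGetD_eq_getElem nums 0 h0 (by omega),
      pvGet, PySem.List.pyGetD_eq_getElem nums 0 (by omega) hj]
    exact (List.pairwise_iff_getElem.mp hs) i.toNat j.toNat (by omega) (by omega) (by omega)

-- characterization of pvFirst / pvLast over Int indices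
theorem pvFirst_mem {nums : List Int} {t : Int} (h : t ∈ nums) :
    0 ≤ pvFirst nums t ∧ pvFirst nums t < (nums.length : Int) ∧
      pvGet nums (pvFirst nums t) = t ∧
      ∀ j : Int, 0 ≤ j → j < pvFirst nums t → pvGet nums j ≠ t := by
  cases haux : pvFirstAux nums t with
  | none => exact absurd h (pvFirstAux_none haux)
  | some k =>
    obtain ⟨h1, h2, h3⟩ := pvFirstAux_some haux
    have hF : pvFirst nums t = (k : Int) := by rw [pvFirst, haux]
    refine ⟨by omega, by omega, ?_, ?_⟩
    · rw [hF]
      have := pvGet_eq (nums := nums) (i := (k : Int)) (by omega) (by omega)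
      simp only [Int.toNat_natCast] at this
      rw [this] at h2; exact (Option.some_inj.mp h2)
    · intro j hj0 hjk
      rw [hF] at hjk
      intro hc
      have hget := pvGet_eq (nums := nums) (i := j) hj0 (by omega)
      rw [hc] at hget
      exact h3 j.toNat (by omega) hget

theorem pvFirst_not_mem {nums : List Int} {t : Int} (h : t ∉ nums) : pvFirst nums t = -1 := by
  cases haux : pvFirstAux nums t with
  | none => rw [pvFirst, haux]
  | some k =>
    obtain ⟨h1, h2, _⟩ := pvFirstAux_some haux
    rw [List.getElem?_eq_getElem h1] at h2
    exact absurd (Option.some_inj.mp h2 ▸ List.getElem_mem h1) h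

theorem pvFirst_min {nums : List Int} {t : Int} {j : Int} (h0 : 0 ≤ j)
    (h1 : j < (nums.length : Int)) (hv : pvGet nums j = t) : pvFirst nums t ≤ j := by
  have hm : t ∈ nums := hv ▸ pvGet_mem h0 h1
  obtain ⟨_, _, _, hmin⟩ := pvFirst_mem hm
  by_contra hc
  exact hmin j h0 (by omega) hv

theorem pvLast_mem {nums : List Int} {t : Int} (h : t ∈ nums) :
    0 ≤ pvLast nums t ∧ pvLast nums t < (nums.length : Int) ∧
      pvGet nums (pvLast nums t) = t ∧
      ∀ j : Int, pvLast nums t < j → j < (nums.length : Int) → pvGet nums j ≠ t := by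
  cases haux : pvLastAux nums t with
  | none => exact absurd h (pvLastAux_none haux)
  | some k =>
    obtain ⟨h1, h2, h3⟩ := pvLastAux_some haux
    have hF : pvLast nums t = (k : Int) := by rw [pvLast, haux]
    refine ⟨by omega, by omega, ?_, ?_⟩
    · rw [hF]
      have := pvGet_eq (nums := nums) (i := (k : Int)) (by omega) (by omega)
      simp only [Int.toNat_natCast] at this
      rw [this] at h2; exact (Option.some_inj.mp h2)
    · intro j hjk hjn
      rw [hF] at hjk
      intro hc
      have hget := pvGet_eq (nums := nums) (i := j) (by omega) (by omega)
      rw [hc] at hget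
      exact h3 j.toNat (by omega) (by omega) hget

theorem pvLast_not_mem {nums : List Int} {t : Int} (h : t ∉ nums) : pvLast nums t = -1 := by
  cases haux : pvLastAux nums t with
  | none => rw [pvLast, haux]
  | some k =>
    obtain ⟨h1, h2, _⟩ := pvLastAux_some haux
    rw [List.getElem?_eq_getElem h1] at h2
    exact absurd (Option.some_inj.mp h2 ▸ List.getElem_mem h1) h

theorem pvLast_max {nums : List Int} {t : Int} {j : Int} (h0 : 0 ≤ j)
    (h1 : j < (nums.length : Int)) (hv : pvGet nums j = t) : j ≤ pvLast nums t := by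
  have hm : t ∈ nums := hv ▸ pvGet_mem h0 h1
  obtain ⟨_, _, _, hmax⟩ := pvLast_mem hm
  by_contra hc
  exact hmax j (by omega) h1 hv

-- when the search interval is exhausted, the target is absent
theorem pvFirst_exit {nums : List Int} {target left right : Int} (hlr : right < left)
    (hlt : ∀ i : Int, 0 ≤ i → i < left → pvGet nums i < target)
    (hub : target ∈ nums → pvFirst nums target ≤ right) : pvFirst nums target = -1 := by
  by_cases hm : target ∈ nums
  · obtain ⟨hF0, _, hFv, _⟩ := pvFirst_mem hm
    have h1 := hub hm
    have h2 := hlt _ hF0 (by omega)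
    rw [hFv] at h2; omega
  · exact pvFirst_not_mem hm

theorem pvLast_exit {nums : List Int} {target left right : Int} (hlr : right < left)
    (hgt : ∀ i : Int, right < i → i < (nums.length : Int) → target < pvGet nums i)
    (hlb : target ∈ nums → left ≤ pvLast nums target) : pvLast nums target = -1 := by
  by_cases hm : target ∈ nums
  · obtain ⟨_, hLn, hLv, _⟩ := pvLast_mem hm
    have h1 := hlb hm
    have h2 := hgt _ (by omega) hLn
    rw [hLv] at h2; omega
  · exact pvLast_not_mem hm

-- if the target is absent, A's loop never takes the equality branch and falls through to -1
theorem aLoop_absent (nums : List Int) (target : Int) (ssp : Bool) (hnm : target ∉ nums) :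
    ∀ (fuel : Nat) (left right : Int), 0 ≤ left → right < (nums.length : Int) →
    search_occurr_loop nums target ssp fuel left right = -1 := by
  intro fuel
  induction fuel with
  | zero => intro left right _ _; rw [search_occurr_loop]
  | succ n ih =>
    intro left right h0 hr
    by_cases hlr : left ≤ right
    · rw [search_occurr_loop, if_pos hlr]
      have hmb := pvMidA_bounds hlr
      set mid := left + PySem.Int.floordiv (right - left) 2 with hmiddef
      have hne : pvGet nums mid ≠ target :=
        fun hc => hnm (hc ▸ pvGet_mem (by omega) (by omega))
      by_cases h1 : pvGet nums mid > target
      · rw [if_pos h1]; exact ih left (mid - 1) h0 (by omega)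
      · rw [if_neg h1]
        by_cases h2 : pvGet nums mid < target
        · rw [if_pos h2]; exact ih (mid + 1) right (by omega) hr
        · exact absurd (by omega) hne
    · rw [search_occurr_loop, if_neg hlr]

-- A's loop computes the first-occurrence index
theorem aLoop_first (nums : List Int) (target : Int) (hs : List.Pairwise (· ≤ ·) nums) :
    ∀ (fuel : Nat) (left right : Int), (right + 1 - left).toNat ≤ fuel →
    0 ≤ left → right < (nums.length : Int) →
    (∀ i : Int, 0 ≤ i → i < left → pvGet nums i < target) →
    (target ∈ nums → pvFirst nums target ≤ right) →
    search_occurr_loop nums target true fuel left right = pvFirst nums target := by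
  intro fuel
  induction fuel with
  | zero =>
    intro left right hf h0 hr hlt hub
    rw [search_occurr_loop]
    exact (pvFirst_exit (by omega) hlt hub).symm
  | succ n ih =>
    intro left right hf h0 hr hlt hub
    by_cases hlr : left ≤ right
    · rw [search_occurr_loop, if_pos hlr]
      have hmb := pvMidA_bounds hlr
      set mid := left + PySem.Int.floordiv (right - left) 2 with hmiddef
      have hmid0 : 0 ≤ mid := by omega
      have hmidn : mid < (nums.length : Int) := by omega
      by_cases h1 : pvGet nums mid > target
      · rw [if_pos h1]
        refine ih left (mid - 1) (by omega) h0 (by omega) hlt ?_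
        intro hm
        obtain ⟨hF0, hFn, hFv, _⟩ := pvFirst_mem hm
        by_contra hc
        have hmono := pv_mono hs hmid0 (by omega : mid ≤ pvFirst nums target) hFn
        rw [hFv] at hmono; omega
      · rw [if_neg h1]
        by_cases h2 : pvGet nums mid < target
        · rw [if_pos h2]
          refine ih (mid + 1) right (by omega) (by omega) hr ?_ hub
          intro i hi0 hilt
          have := pv_mono hs hi0 (by omega : i ≤ mid) hmidn
          omega
        · rw [if_neg h2, if_pos rfl]
          have heq : pvGet nums mid = target := by omega
          by_cases h3 : left = mid ∨ pvGet nums (mid - 1) < target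
          · rw [if_pos h3]
            have hm : target ∈ nums := heq ▸ pvGet_mem hmid0 hmidn
            obtain ⟨hF0, hFn, hFv, _⟩ := pvFirst_mem hm
            have hFle := pvFirst_min hmid0 hmidn heq
            rcases h3 with h3 | h3
            · by_contra hne
              have hflt : pvFirst nums target < left := by omega
              have := hlt _ hF0 hflt
              rw [hFv] at this; omega
            · by_contra hne
              have := pv_mono hs hF0 (by omega : pvFirst nums target ≤ mid - 1)
                (by omega : mid - 1 < (nums.length : Int))
              rw [hFv] at this; omega
          · rw [if_neg h3]
            push Not at h3
            obtain ⟨hne, hge⟩ := h3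
            have heq1 : pvGet nums (mid - 1) = target := by
              have := pv_mono hs (by omega : (0:Int) ≤ mid - 1)
                (by omega : mid - 1 ≤ mid) hmidn
              omega
            refine ih left (mid - 1) (by omega) h0 (by omega) hlt ?_
            intro _
            exact pvFirst_min (by omega) (by omega) heq1
    · rw [search_occurr_loop, if_neg hlr]
      exact (pvFirst_exit (by omega) hlt hub).symm

-- A's loop computes the last-occurrence index
theorem aLoop_last (nums : List Int) (target : Int) (hs : List.Pairwise (· ≤ ·) nums) :
    ∀ (fuel : Nat) (left right : Int), (right + 1 - left).toNat ≤ fuel →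
    0 ≤ left → right < (nums.length : Int) →
    (∀ i : Int, right < i → i < (nums.length : Int) → target < pvGet nums i) →
    (target ∈ nums → left ≤ pvLast nums target) →
    search_occurr_loop nums target false fuel left right = pvLast nums target := by
  intro fuel
  induction fuel with
  | zero =>
    intro left right hf h0 hr hgt hlb
    rw [search_occurr_loop]
    exact (pvLast_exit (by omega) hgt hlb).symm
  | succ n ih =>
    intro left right hf h0 hr hgt hlb
    by_cases hlr : left ≤ right
    · rw [search_occurr_loop, if_pos hlr]
      have hmb := pvMidA_bounds hlr
      set mid := left + PySem.Int.floordiv (right - left) 2 with hmiddef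
      have hmid0 : 0 ≤ mid := by omega
      have hmidn : mid < (nums.length : Int) := by omega
      by_cases h1 : pvGet nums mid > target
      · rw [if_pos h1]
        refine ih left (mid - 1) (by omega) h0 (by omega) ?_ hlb
        intro i hi1 hi2
        have := pv_mono hs hmid0 (by omega : mid ≤ i) hi2
        omega
      · rw [if_neg h1]
        by_cases h2 : pvGet nums mid < target
        · rw [if_pos h2]
          refine ih (mid + 1) right (by omega) (by omega) hr hgt ?_
          intro hm
          obtain ⟨hL0, hLn, hLv, _⟩ := pvLast_mem hm
          by_contra hc
          have hmono := pv_mono hs hL0 (by omega : pvLast nums target ≤ mid) hmidn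
          rw [hLv] at hmono; omega
        · rw [if_neg h2, if_neg (by simp : ¬ (false = true))]
          have heq : pvGet nums mid = target := by omega
          by_cases h3 : right = mid ∨ pvGet nums (mid + 1) > target
          · rw [if_pos h3]
            have hm : target ∈ nums := heq ▸ pvGet_mem hmid0 hmidn
            obtain ⟨hL0, hLn, hLv, _⟩ := pvLast_mem hm
            have hLge := pvLast_max hmid0 hmidn heq
            rcases h3 with h3 | h3
            · by_contra hne
              have := hgt _ (by omega) hLn
              rw [hLv] at this; omega
            · by_contra hne
              by_cases hLr : pvLast nums target ≤ right
              · have := pv_mono hs (by omega : (0:Int) ≤ mid + 1)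
                  (by omega : mid + 1 ≤ pvLast nums target) hLn
                rw [hLv] at this; omega
              · have := hgt _ (by omega) hLn
                rw [hLv] at this; omega
          · rw [if_neg h3]
            push Not at h3
            obtain ⟨hne, hle⟩ := h3
            have heq1 : pvGet nums (mid + 1) = target := by
              have := pv_mono hs hmid0 (by omega : mid ≤ mid + 1)
                (by omega : mid + 1 < (nums.length : Int))
              omega
            refine ih (mid + 1) right (by omega) (by omega) hr hgt ?_
            intro _
            exact pvLast_max (by omega) (by omega) heq1
    · rw [search_occurr_loop, if_neg hlr]
      exact (pvLast_exit (by omega) hgt hlb).symm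

-- B's forward scan returns the offset first occurrence
theorem bFirst_eq (l : List Int) (t : Int) :
    ∀ i : Int, search_occurr_alt_first l t i =
      (match pvFirstAux l t with | some k => i + (k : Int) | none => -1) := by
  induction l with
  | nil => intro i; rfl
  | cons x xs ih =>
    intro i
    by_cases hx : x = t
    · simp [search_occurr_alt_first, pvFirstAux, hx]
    · rw [search_occurr_alt_first, if_neg hx, ih (i + 1)]
      simp only [pvFirstAux, if_neg hx]
      cases pvFirstAux xs t with
      | none => rfl
      | some k => simp only [Option.map_some]; push_cast; ring

-- B's recording scan returns the offset last occurrence (or the accumulator)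
theorem bLast_eq (l : List Int) (t : Int) :
    ∀ i res : Int, search_occurr_alt_last l t i res =
      (match pvLastAux l t with | some k => i + (k : Int) | none => res) := by
  induction l with
  | nil => intro i res; rfl
  | cons x xs ih =>
    intro i res
    rw [search_occurr_alt_last, ih (i + 1)]
    simp only [pvLastAux]
    cases pvLastAux xs t with
    | some k => push_cast; ring
    | none =>
      by_cases hx : x = t
      · simp [hx]
      · simp [hx]

theorem bPort_first (nums : List Int) (target : Int) :
    search_occurr_alt nums target true = pvFirst nums target := by
  rw [search_occurr_alt, if_pos rfl, bFirst_eq, pvFirst]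
  cases pvFirstAux nums target with
  | none => rfl
  | some k => simp

theorem bPort_last (nums : List Int) (target : Int) :
    search_occurr_alt nums target false = pvLast nums target := by
  rw [search_occurr_alt, if_neg (by simp : ¬ (false = true)), bLast_eq, pvLast]
  cases pvLastAux nums target with
  | none => rfl
  | some k => simp

-- on absent targets B also returns -1
theorem bPort_absent (nums : List Int) (target : Int) (ssp : Bool) (hnm : target ∉ nums) :
    search_occurr_alt nums target ssp = -1 := by
  cases ssp with
  | true => rw [bPort_first]; exact pvFirst_not_mem hnm
  | false => rw [bPort_last]; exact pvLast_not_mem hnm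

-- ===== VERDICT (by name: the statement is the Claim_ definition above) =====
theorem search_occurr_spec : Claim_equal_search_occurr := by
  intro nums target ssp _ hpre
  unfold Spec_search_occurr
  rcases hpre with hs | hnm
  case inr =>
    rw [bPort_absent nums target ssp hnm, search_occurr,
      aLoop_absent nums target ssp hnm nums.length 0 _ (by omega) (by omega)]
  case inl =>
  cases ssp with
  | true =>
    rw [bPort_first, search_occurr,
      aLoop_first nums target hs nums.length 0 _ (by omega)
        (by omega) (by omega) (by omega)
        (fun h => by have := pvFirst_mem h; omega)]
  | false =>
    rw [bPort_last, search_occurr,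
      aLoop_last nums target hs nums.length 0 _ (by omega)
        (by omega) (by omega) (by omega)
        (fun h => by have := pvLast_mem h; omega)]
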